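-- pv_equiv track=rewrite | github.com/buntonj/CoveringZ3 | steinernetworkx.py | _lightest_meta_edges
-- ===== SOURCE A (Python) =====
-- from collections import namedtuple,defaultdict
--
-- def _ordered(u, v):
--     """Returns the nodes in an undirected edge in lower-triangular order"""
--     return (u, v) if u < v else (v, u)
--
-- MetaEdge = namedtuple('MetaEdge', ('meta_uv', 'uv', 'w'))
--
-- def _lightest_meta_edges(mapping, avail_uv, avail_w):
--     """Maps available edges in the original graph to edges in the metagraph.
--
--     Parameters
--     ----------
--     mapping : dict
--         mapping produced by :func:`collapse`, that maps each node in the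
--         original graph to a node in the meta graph
--
--     avail_uv : list
--         list of edges
--
--     avail_w : list
--         list of edge weights
--
--     Notes
--     -----
--     Each node in the metagraph is a k-edge-connected component in the original
--     graph.  We don't care about any edge within the same k-edge-connected
--     component, so we ignore self edges.  We also are only intereseted in the
--     minimum weight edge bridging each k-edge-connected component so, we group
--     the edges by meta-edge and take the lightest in each group.
--
--     Example
--     -------
--     >>> # Each group represents a meta-node
--     >>> groups = ([1, 2, 3], [4, 5], [6])
--     >>> mapping = {n: meta_n for meta_n, ns in enumerate(groups) for n in ns}
--     >>> avail_uv = [(1, 2), (3, 6), (1, 4), (5, 2), (6, 1), (2, 6), (3, 1)]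
--     >>> avail_w =  [    20,     99,     20,     15,     50,     99,     20]
--     >>> sorted(_lightest_meta_edges(mapping, avail_uv, avail_w))
--     [MetaEdge(meta_uv=(0, 1), uv=(5, 2), w=15), MetaEdge(meta_uv=(0, 2), uv=(6, 1), w=50)]
--     """
--     grouped_wuv = defaultdict(list)
--     for w, (u, v) in zip(avail_w, avail_uv):
--         # Order the meta-edge so it can be used as a dict key
--         meta_uv = _ordered(mapping[u], mapping[v])
--         # Group each available edge using the meta-edge as a key
--         grouped_wuv[meta_uv].append((w, u, v))
--
--     # Now that all available edges are grouped, choose one per group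
--     for (mu, mv), choices_wuv in grouped_wuv.items():
--         # Ignore available edges within the same meta-node
--         if mu != mv:
--             # Choose the lightest available edge belonging to each meta-edge
--             w, u, v = min(choices_wuv)
--             yield MetaEdge((mu, mv), (u, v), w)
-- ===== SOURCE B (Python) =====
-- from collections import namedtuple
--
-- def _ordered(u, v):
--     """Returns the nodes in an undirected edge in lower-triangular order"""
--     return (u, v) if u < v else (v, u)
--
-- MetaEdge = namedtuple('MetaEdge', ('meta_uv', 'uv', 'w'))
--
-- def _lightest_meta_edges(mapping, avail_uv, avail_w):
--     # One pass: keep only the running best (w, u, v) per meta-edge.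
--     best = {}
--     for w, (u, v) in zip(avail_w, avail_uv):
--         meta_uv = _ordered(mapping[u], mapping[v])
--         cur = best.get(meta_uv)
--         if cur is None or (w, u, v) < cur:
--             best[meta_uv] = (w, u, v)
--     for (mu, mv), (w, u, v) in best.items():
--         if mu != mv:
--             yield MetaEdge((mu, mv), (u, v), w)
-- ===== Notes on version B (the rewrite author's own statement) =====
-- stated objective: simpler
-- what changed: A collects every candidate (w,u,v) into per-meta-edge lists and then runs min() over each group in a second pass; B makes a single pass that keeps only the running best triple per meta-edge (strict-< replacement, first-seen key inserts) and emits the stored winners directly.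
import Mathlib
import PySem

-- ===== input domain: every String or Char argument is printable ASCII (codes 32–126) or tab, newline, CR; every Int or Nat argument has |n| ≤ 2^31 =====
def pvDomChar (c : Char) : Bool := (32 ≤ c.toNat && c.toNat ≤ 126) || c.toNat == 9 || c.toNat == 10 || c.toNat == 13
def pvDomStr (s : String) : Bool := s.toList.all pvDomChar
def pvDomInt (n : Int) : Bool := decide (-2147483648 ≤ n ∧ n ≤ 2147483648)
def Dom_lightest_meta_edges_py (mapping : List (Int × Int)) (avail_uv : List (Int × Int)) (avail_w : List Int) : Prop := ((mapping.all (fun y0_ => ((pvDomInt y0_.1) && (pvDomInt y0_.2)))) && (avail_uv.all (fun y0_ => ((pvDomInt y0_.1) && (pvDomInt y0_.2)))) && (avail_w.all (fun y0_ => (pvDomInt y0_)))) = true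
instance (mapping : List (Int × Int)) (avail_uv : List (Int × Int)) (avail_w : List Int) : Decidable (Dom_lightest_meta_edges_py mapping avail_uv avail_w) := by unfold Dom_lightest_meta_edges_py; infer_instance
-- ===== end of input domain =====

-- B replaces A's group-all-candidates-then-min second pass by a single pass keeping the running best (w,u,v) per meta-edge (objective: simpler).

-- ===== PORT A =====
-- helpers shared by both ports: B's Python reuses the module helper _ordered and the same mapping[·] lookup
def pvOrdered (u v : Int) : Int × Int := if u < v then (u, v) else (v, u)
-- mapping[u]; the default 0 is never reached under Pre_ (KeyError inputs are excluded there)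
def pvLookup (mapping : List (Int × Int)) (u : Int) : Int := (PySem.Dict.mk mapping).getD u 0
def pvKey (mapping : List (Int × Int)) (p : Int × (Int × Int)) : Int × Int :=
  pvOrdered (pvLookup mapping p.2.1) (pvLookup mapping p.2.2)
def pvTriple (p : Int × (Int × Int)) : Int × Int × Int := (p.1, p.2.1, p.2.2)
-- Python's lexicographic '<' on int 3-tuples (hand port; exact on Int triples)
def pvTLt (a b : Int × Int × Int) : Bool :=
  a.1 < b.1 || (a.1 == b.1 && (a.2.1 < b.2.1 || (a.2.1 == b.2.1 && a.2.2 < b.2.2)))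
-- min(choices) on 3-tuples: Python's running min, first minimal kept
-- (the [] branch is unreachable: every group A builds is nonempty)
def pvMin (l : List (Int × Int × Int)) : Int × Int × Int :=
  match l with
  | [] => (0, 0, 0)
  | x :: t => t.foldl (fun m y => if pvTLt y m then y else m) x

def lightest_meta_edges_py (mapping : List (Int × Int)) (avail_uv : List (Int × Int)) (avail_w : List Int) : List ((Int × Int) × (Int × Int) × Int) :=
  let grouped := (avail_w.zip avail_uv).foldl
    (fun d p => d.modify (pvKey mapping p) [] (· ++ [pvTriple p])) PySem.Dict.empty
  grouped.items.foldl
    (fun out kv =>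
      if kv.1.1 ≠ kv.1.2 then
        let m := pvMin kv.2
        out ++ [(kv.1, (m.2.1, m.2.2), m.1)]
      else out) []

-- ===== PORT B =====
-- one loop step of B: keep the running best (strictly smaller replaces; first-seen key inserts)
def pvStep (mapping : List (Int × Int)) (d : PySem.Dict (Int × Int) (Int × Int × Int)) (p : Int × (Int × Int)) : PySem.Dict (Int × Int) (Int × Int × Int) :=
  let k := pvKey mapping p
  let t := pvTriple p
  match d.get? k with
  | none => d.insert k t
  | some cur => if pvTLt t cur then d.insert k t else d

def lightest_meta_edges_py_alt (mapping : List (Int × Int)) (avail_uv : List (Int × Int)) (avail_w : List Int) : List ((Int × Int) × (Int × Int) × Int) :=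
  let best := (avail_w.zip avail_uv).foldl (pvStep mapping) PySem.Dict.empty
  best.items.foldl
    (fun out kv =>
      if kv.1.1 ≠ kv.1.2 then out ++ [(kv.1, (kv.2.2.1, kv.2.2.2), kv.2.1)]
      else out) []

-- ===== PRECONDITION & SPEC =====
-- Pre_ excludes exactly the inputs where Python A raises KeyError: some available edge (paired with a weight by zip) has an endpoint that is not a key of mapping.
def Pre_lightest_meta_edges_py (mapping : List (Int × Int)) (avail_uv : List (Int × Int)) (avail_w : List Int) : Prop :=
  ∀ q ∈ avail_w.zip avail_uv, q.2.1 ∈ mapping.map Prod.fst ∧ q.2.2 ∈ mapping.map Prod.fst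
instance (mapping : List (Int × Int)) (avail_uv : List (Int × Int)) (avail_w : List Int) : Decidable (Pre_lightest_meta_edges_py mapping avail_uv avail_w) := by unfold Pre_lightest_meta_edges_py; infer_instance
def pvWitness_lightest_meta_edges_py : (List (Int × Int)) × (List (Int × Int)) × List Int :=
  ([(1, 0), (2, 0), (4, 1)], [(1, 2), (1, 4), (2, 4)], [3, 5, 2])

def Spec_lightest_meta_edges_py (mapping : List (Int × Int)) (avail_uv : List (Int × Int)) (avail_w : List Int) (out : List ((Int × Int) × (Int × Int) × Int)) : Prop := out = lightest_meta_edges_py_alt mapping avail_uv avail_w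
instance (mapping : List (Int × Int)) (avail_uv : List (Int × Int)) (avail_w : List Int) (out : List ((Int × Int) × (Int × Int) × Int)) : Decidable (Spec_lightest_meta_edges_py mapping avail_uv avail_w out) := by unfold Spec_lightest_meta_edges_py; infer_instance

-- ===== CLAIM (what is proved, stated in full; the proofs are below) =====
def Claim_equal_lightest_meta_edges_py : Prop := ∀ (mapping : List (Int × Int)) (avail_uv : List (Int × Int)) (avail_w : List Int), Dom_lightest_meta_edges_py mapping avail_uv avail_w → Pre_lightest_meta_edges_py mapping avail_uv avail_w → Spec_lightest_meta_edges_py mapping avail_uv avail_w (lightest_meta_edges_py mapping avail_uv avail_w)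

-- ===== LEMMAS AND PROOFS =====
-- (the two ports agree on ALL inputs; the proof does not need Pre_, which only excludes Python A's KeyError inputs)

-- the candidate triples scanned for a meta-edge key k, in scan order
def pvCand (mapping : List (Int × Int)) (l : List (Int × (Int × Int))) (k : Int × Int) : List (Int × Int × Int) :=
  (l.filter (fun p => pvKey mapping p == k)).map pvTriple

def pvRun (cur : Int × Int × Int) (cs : List (Int × Int × Int)) : Int × Int × Int :=
  cs.foldl (fun m y => if pvTLt y m then y else m) cur

-- B's stored value after folding candidates cs into an optional current best
def pvComb : Option (Int × Int × Int) → List (Int × Int × Int) → Option (Int × Int × Int)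
  | none, [] => none
  | none, c :: cs => some (pvRun c cs)
  | some cur, cs => some (pvRun cur cs)

-- value stored by A's grouping fold at key k: all candidates in scan order
theorem pvG_getD (mapping : List (Int × Int)) (l : List (Int × (Int × Int))) (k : Int × Int) :
    ((l.foldl (fun d p => d.modify (pvKey mapping p) [] (· ++ [pvTriple p])) PySem.Dict.empty).getD k [])
      = pvCand mapping l k := by
  have h : (l.foldl (fun d p => d.modify (pvKey mapping p) [] (· ++ [pvTriple p])) (PySem.Dict.empty : PySem.Dict (Int × Int) (List (Int × Int × Int))))
      = (l.map (fun p => (pvKey mapping p, pvTriple p))).foldl (fun d q => d.modify q.1 [] (· ++ [q.2])) PySem.Dict.empty := by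
    rw [List.foldl_map]
  rw [h, PySem.Dict.getD_foldl_modify_append]
  simp [pvCand, List.filter_map]
  rfl

-- value computed by B's running-best fold at key k
theorem pvB_get? (mapping : List (Int × Int)) (l : List (Int × (Int × Int)))
    (d : PySem.Dict (Int × Int) (Int × Int × Int)) (k : Int × Int) :
    (l.foldl (pvStep mapping) d).get? k = pvComb (d.get? k) (pvCand mapping l k) := by
  induction l generalizing d with
  | nil =>
    cases h : d.get? k <;> simp [pvCand, pvComb, h, pvRun]
  | cons p l ih =>
    simp only [List.foldl_cons, ih]
    by_cases hk : pvKey mapping p = k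
    · subst hk
      cases h : d.get? (pvKey mapping p) with
      | none =>
        have hs : pvStep mapping d p = d.insert (pvKey mapping p) (pvTriple p) := by
          simp [pvStep, h]
        rw [hs, PySem.Dict.get?_insert_self]
        simp [pvCand, pvComb, pvRun]
      | some cur =>
        have hs : (pvStep mapping d p).get? (pvKey mapping p)
            = some (if pvTLt (pvTriple p) cur then pvTriple p else cur) := by
          simp only [pvStep, h]
          split_ifs with ht <;> simp [PySem.Dict.get?_insert_self, h]
        rw [hs]
        simp [pvCand, pvComb, pvRun]
    · have hs : (pvStep mapping d p).get? k = d.get? k := by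
        simp only [pvStep]
        cases h : d.get? (pvKey mapping p) with
        | none => exact PySem.Dict.get?_insert_of_ne d _ (fun he => hk he.symm)
        | some cur =>
          simp only []
          split_ifs with ht
          · exact PySem.Dict.get?_insert_of_ne d _ (fun he => hk he.symm)
          · rfl
      rw [hs]
      simp [pvCand, hk]

theorem pvStep_keys (mapping : List (Int × Int)) (d : PySem.Dict (Int × Int) (Int × Int × Int)) (p : Int × (Int × Int)) :
    (pvStep mapping d p).keys = if d.contains (pvKey mapping p) then d.keys else d.keys ++ [pvKey mapping p] := by
  cases h : d.get? (pvKey mapping p) with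
  | none =>
    have hc : d.contains (pvKey mapping p) = false := by
      rw [PySem.Dict.contains_eq_isSome_get?, h]; rfl
    simp [pvStep, h, hc, PySem.Dict.keys_insert_of_not_contains d _ hc]
  | some cur =>
    have hc : d.contains (pvKey mapping p) = true := by
      rw [PySem.Dict.contains_eq_isSome_get?, h]; rfl
    simp only [pvStep, h, hc, if_true]
    split_ifs with ht
    · exact PySem.Dict.keys_insert_of_contains d _ hc
    · rfl

-- A's grouping fold and B's running-best fold insert meta-edge keys in the same order
theorem pvKeys_eq (mapping : List (Int × Int)) (l : List (Int × (Int × Int)))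
    (dA : PySem.Dict (Int × Int) (List (Int × Int × Int))) (dB : PySem.Dict (Int × Int) (Int × Int × Int))
    (h : dA.keys = dB.keys) :
    (l.foldl (fun d p => d.modify (pvKey mapping p) [] (· ++ [pvTriple p])) dA).keys
      = (l.foldl (pvStep mapping) dB).keys := by
  induction l generalizing dA dB with
  | nil => simpa using h
  | cons p l ih =>
    simp only [List.foldl_cons]
    apply ih
    rw [pvStep_keys, PySem.Dict.keys_modify]
    have hc : dA.contains (pvKey mapping p) = dB.contains (pvKey mapping p) := by
      rw [PySem.Dict.contains_eq_decide_mem_keys, PySem.Dict.contains_eq_decide_mem_keys, h]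
    by_cases hm : dB.contains (pvKey mapping p) = true
    · rw [PySem.Dict.keys_insert_of_contains dA _ (hc.trans hm), hm, if_pos rfl, h]
    · have hm' : dB.contains (pvKey mapping p) = false := by simpa using hm
      rw [PySem.Dict.keys_insert_of_not_contains dA _ (hc.trans hm'), hm', if_neg (by simp), h]

theorem pvMain (mapping : List (Int × Int)) (avail_uv : List (Int × Int)) (avail_w : List Int) :
    lightest_meta_edges_py mapping avail_uv avail_w = lightest_meta_edges_py_alt mapping avail_uv avail_w := by
  set l := avail_w.zip avail_uv with hl
  set GA := l.foldl (fun d p => d.modify (pvKey mapping p) [] (· ++ [pvTriple p])) (PySem.Dict.empty : PySem.Dict (Int × Int) (List (Int × Int × Int))) with hGA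
  set GB := l.foldl (pvStep mapping) (PySem.Dict.empty : PySem.Dict (Int × Int) (Int × Int × Int)) with hGB
  have nodA : GA.keys.Nodup := by
    rw [hGA]
    exact PySem.Dict.nodup_keys_foldl_modify_key l (pvKey mapping) [] (fun _ p v => v ++ [pvTriple p]) _ (by simp)
  have hkeys : GA.keys = GB.keys := by
    rw [hGA, hGB]
    exact pvKeys_eq mapping l _ _ (by simp)
  have nodB : GB.keys.Nodup := hkeys ▸ nodA
  have hkeysChar : GA.keys = PySem.Set.ofList (l.map (pvKey mapping)) := by
    rw [hGA, PySem.Dict.keys_foldl_modify_key l (pvKey mapping) [] (fun _ p v => v ++ [pvTriple p])]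
    simp [PySem.Set.update_nil_left]
  unfold lightest_meta_edges_py lightest_meta_edges_py_alt
  rw [← hl, ← hGA, ← hGB]
  show GA.items.foldl _ [] = GB.items.foldl _ []
  rw [PySem.Dict.items_eq_map_keys GA nodA [], PySem.Dict.items_eq_map_keys GB nodB (0,0,0), ← hkeys]
  rw [List.foldl_map, List.foldl_map]
  rw [PySem.List.foldl_append_ite (p := fun k : Int × Int => k.1 ≠ k.2)
        (f := fun k => (k, ((pvMin (GA.getD k [])).2.1, (pvMin (GA.getD k [])).2.2), (pvMin (GA.getD k [])).1)),
      PySem.List.foldl_append_ite (p := fun k : Int × Int => k.1 ≠ k.2)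
        (f := fun k => (k, ((GB.getD k (0,0,0)).2.1, (GB.getD k (0,0,0)).2.2), (GB.getD k (0,0,0)).1))]
  simp only [List.nil_append]
  apply List.map_congr_left
  intro k hkf
  have hkmem : k ∈ GA.keys := (List.mem_filter.mp hkf).1
  have hcand : pvCand mapping l k ≠ [] := by
    rw [hkeysChar] at hkmem
    rw [PySem.Set.mem_ofList] at hkmem
    obtain ⟨p, hp, hpk⟩ := List.mem_map.mp hkmem
    intro hnil
    rw [pvCand, List.map_eq_nil_iff, List.filter_eq_nil_iff] at hnil
    exact hnil p hp (by simp [hpk])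
  obtain ⟨c, cs, hc⟩ := List.exists_cons_of_ne_nil hcand
  have hA : GA.getD k [] = c :: cs := by rw [hGA, pvG_getD, hc]
  have hB : GB.getD k (0,0,0) = pvRun c cs := by
    rw [PySem.Dict.getD_eq_get?_getD, hGB, pvB_get?, PySem.Dict.get?_empty, hc]
    rfl
  rw [hA, hB]
  rfl

-- ===== VERDICT (by name: the statement is the Claim_ definition above) =====
theorem lightest_meta_edges_py_spec : Claim_equal_lightest_meta_edges_py := by
  intro mapping avail_uv avail_w _ _
  unfold Spec_lightest_meta_edges_py
  exact pvMain mapping avail_uv avail_w
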